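-- pv_equiv track=rewrite | github.com/MMw-Unibo/sumo-distributed-wbalancer | engine/partitioning/partition_manager.py | __check_shared_edges
-- ===== SOURCE A (Python) =====
-- def __check_shared_edges(partitions):
--     '''
--     Check the edges shared among partitions, these are the border edges to consider in the partitioning.
--     Args:
--         partitions: list of lists, each list contains the edges of a partition.
--
--     Returns:
--         shared_edges: Dictionary with the shared edges for each partition
--         {
--             "partition1": [edge1, edge2, ...],
--             "partition2": [edge3, edge4, ...],
--             ...
--         }
--         raw_shared_edges: Set of edges shared among partitions
--     '''
--
--     shared_edges = {}
--     edge_based_sharing = {}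
--     raw_shared_edges = set()
--     neighbours = {}
--
--     for i in range(len(partitions)):
--         for element in partitions[i]:
--             for j in range(len(partitions)):
--                 if j > i and element in partitions[j]:
--                     if i not in shared_edges:
--                         shared_edges[i] = []
--                     if j not in shared_edges:
--                         shared_edges[j] = []
--                     if i not in neighbours:
--                         neighbours[i] = set()
--                     if j not in neighbours:
--                         neighbours[j] = set()
--
--                     edge_based_sharing[element] = [i, j]
--                     raw_shared_edges.add(element)
--                     shared_edges[i].append(element)
--                     shared_edges[j].append(element)
--                     neighbours[i].add(j)
--                     neighbours[j].add(i)
--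
--
--     # logger.info("Shared edges: {}".format(raw_shared_edges))
--     # logger.info("Shared edges per partitions: {}".format(shared_edges))
--     # logger.info("Edge-based sharing: {}".format(edge_based_sharing))
--     # logger.info("Neighbours: {}".format(neighbours))
--
--     return shared_edges, raw_shared_edges, edge_based_sharing, neighbours
-- ===== SOURCE B (Python) =====
-- def __check_shared_edges(partitions):
--     # B: inverted index edge -> ascending list of the partitions containing it; per (i, element)
--     # one block update over the actual sharing partners js (cached per partition), with bulk
--     # extend/update on the i side instead of per-pair statements.
--     occurrences = {}
--     for idx, part in enumerate(partitions):
--         for element in dict.fromkeys(part):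
--             occurrences.setdefault(element, []).append(idx)
--
--     shared_edges = {}
--     edge_based_sharing = {}
--     raw_shared_edges = set()
--     neighbours = {}
--
--     for i, part in enumerate(partitions):
--         partners = {}
--         for element in part:
--             js = partners.get(element)
--             if js is None:
--                 partners[element] = js = [j for j in occurrences[element] if j > i]
--             if js:
--                 raw_shared_edges.add(element)
--                 edge_based_sharing[element] = [i, js[-1]]
--                 si = shared_edges.setdefault(i, [])
--                 ni = neighbours.setdefault(i, set())
--                 for j in js:
--                     sj = shared_edges.get(j)
--                     if sj is None:
--                         shared_edges[j] = sj = []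
--                     sj.append(element)
--                     nj = neighbours.get(j)
--                     if nj is None:
--                         neighbours[j] = nj = set()
--                     nj.add(i)
--                 si.extend([element] * len(js))
--                 ni.update(js)
--     return shared_edges, raw_shared_edges, edge_based_sharing, neighbours
-- ===== Notes on version B (the rewrite author's own statement) =====
-- stated objective: faster
-- what changed: B replaces A's all-pairs membership scan by an inverted index edge -> ascending partition indices and processes each (i, element) as one block over its actual sharing partners (cached per partition, bulk extend/update on the i side) instead of testing every edge against every later partition.
import Mathlib
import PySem

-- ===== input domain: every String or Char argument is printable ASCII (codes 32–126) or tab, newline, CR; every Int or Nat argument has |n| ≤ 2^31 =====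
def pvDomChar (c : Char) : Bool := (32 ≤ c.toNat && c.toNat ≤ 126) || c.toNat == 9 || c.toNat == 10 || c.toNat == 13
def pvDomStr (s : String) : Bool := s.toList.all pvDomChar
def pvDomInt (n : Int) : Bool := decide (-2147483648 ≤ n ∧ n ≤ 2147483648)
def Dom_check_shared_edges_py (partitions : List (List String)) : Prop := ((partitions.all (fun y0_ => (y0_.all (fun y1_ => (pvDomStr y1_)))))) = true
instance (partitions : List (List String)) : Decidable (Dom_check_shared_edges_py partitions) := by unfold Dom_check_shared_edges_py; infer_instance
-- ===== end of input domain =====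

-- B replaces A's all-pairs membership scan by an inverted index (edge -> ascending partition
-- indices) and processes each (i, element) as ONE block over its actual sharing partners js,
-- with bulk extend/update on the i side instead of per-pair statements.

-- ===== PORT A =====
-- for i in range(len(partitions)): for element in partitions[i]:
--   for j in range(len(partitions)): if j > i and element in partitions[j]: <update all four maps>
def check_shared_edges_py (partitions : List (List String)) : (List (Int × List String)) × List String × (List (String × List Int)) × (List (Int × List Int)) :=
  let st := (PySem.List.enumerate partitions 0).foldl (fun st ip =>
      ip.2.foldl (fun st element =>
        (PySem.List.enumerate partitions 0).foldl (fun st jp =>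
          if jp.1 > ip.1 ∧ jp.2.contains element then
            let se := st.1
            let raw := st.2.1
            let ebs := st.2.2.1
            let nb := st.2.2.2
            let se := if se.contains ip.1 then se else se.insert ip.1 []      -- if i not in shared_edges: shared_edges[i] = []
            let se := if se.contains jp.1 then se else se.insert jp.1 []
            let nb := if nb.contains ip.1 then nb else nb.insert ip.1 []      -- if i not in neighbours: neighbours[i] = set()
            let nb := if nb.contains jp.1 then nb else nb.insert jp.1 []
            let ebs := ebs.insert element [ip.1, jp.1]                        -- edge_based_sharing[element] = [i, j]
            let raw := PySem.Set.add raw element                              -- raw_shared_edges.add(element)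
            let se := se.modify ip.1 [] (fun l => l ++ [element])             -- shared_edges[i].append(element)
            let se := se.modify jp.1 [] (fun l => l ++ [element])
            let nb := nb.modify ip.1 [] (fun s => PySem.Set.add s jp.1)       -- neighbours[i].add(j)
            let nb := nb.modify jp.1 [] (fun s => PySem.Set.add s ip.1)
            (se, raw, ebs, nb)
          else st) st) st)
    (PySem.Dict.empty, PySem.Set.empty, PySem.Dict.empty, PySem.Dict.empty)
  (st.1.items, st.2.1, st.2.2.1.items, st.2.2.2.items)

-- ===== PORT B =====
-- occurrences = {}; for idx, part in enumerate(partitions):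
--   for element in dict.fromkeys(part): occurrences.setdefault(element, []).append(idx)
-- (setdefault(k, dflt) followed by an in-place append = Dict.modify k dflt (· ++ ·))
def pvOccurrences (partitions : List (List String)) : PySem.Dict String (List Int) :=
  (PySem.List.enumerate partitions 0).foldl (fun d ip =>
      (PySem.List.dedup ip.2).foldl (fun d element => d.modify element [] (fun v => v ++ [ip.1])) d)
    PySem.Dict.empty

-- for i, part in enumerate(partitions):
--   partners = {}   (per-partition cache: element -> its partner list js)
--   for element in part:
--     js = partners.get(element)
--     if js is None: partners[element] = js = [j for j in occurrences[element] if j > i]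
--     if js: raw.add(element); edge_based_sharing[element] = [i, js[-1]];
--            si = shared_edges.setdefault(i, []); ni = neighbours.setdefault(i, set())
--            for j in js: <get-or-create shared_edges[j] / neighbours[j], append/add>
--            si.extend([element]*len(js)); ni.update(js)
-- (si/ni alias the list/set stored under key i: the trailing extend/update land on key i;
--  'sj is None' after dict.get means the key is absent, i.e. not contains)
def check_shared_edges_py_alt (partitions : List (List String)) : (List (Int × List String)) × List String × (List (String × List Int)) × (List (Int × List Int)) :=
  let occ := pvOccurrences partitions
  let st := (PySem.List.enumerate partitions 0).foldl (fun st ip =>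
      (ip.2.foldl (fun (stc : ((PySem.Dict Int (List String)) × (PySem.Set String) × (PySem.Dict String (List Int)) × (PySem.Dict Int (PySem.Set Int))) × PySem.Dict String (List Int)) element =>
        let jsOpt := stc.2.get? element
        let js := match jsOpt with
          | some js => js
          | none => (occ.getD element []).filter (fun j => j > ip.1)
        let partners := match jsOpt with
          | some _ => stc.2
          | none => stc.2.insert element js
        ((if js ≠ [] then
            let st := stc.1
            let raw := PySem.Set.add st.2.1 element
            let ebs := st.2.2.1.insert element [ip.1, PySem.List.pyGetD js (-1) 0]
            let se := st.1.setdefault ip.1 []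
            let nb := st.2.2.2.setdefault ip.1 []
            let senb := js.foldl (fun (senb : PySem.Dict Int (List String) × PySem.Dict Int (PySem.Set Int)) j =>
                ((if senb.1.contains j then senb.1 else senb.1.insert j []).modify j [] (fun l => l ++ [element]),
                 (if senb.2.contains j then senb.2 else senb.2.insert j []).modify j [] (fun s => PySem.Set.add s ip.1))) (se, nb)
            let se := senb.1.modify ip.1 [] (fun l => l ++ List.replicate js.length element)
            let nb := senb.2.modify ip.1 [] (fun s => PySem.Set.update s js)
            (se, raw, ebs, nb)
          else stc.1), partners)) (st, PySem.Dict.empty)).1)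
    (PySem.Dict.empty, PySem.Set.empty, PySem.Dict.empty, PySem.Dict.empty)
  (st.1.items, st.2.1, st.2.2.1.items, st.2.2.2.items)

-- ===== PRECONDITION & SPEC =====
def Spec_check_shared_edges_py (partitions : List (List String)) (out : (List (Int × List String)) × List String × (List (String × List Int)) × (List (Int × List Int))) : Prop := out = check_shared_edges_py_alt partitions
instance (partitions : List (List String)) (out : (List (Int × List String)) × List String × (List (String × List Int)) × (List (Int × List Int))) : Decidable (Spec_check_shared_edges_py partitions out) := by unfold Spec_check_shared_edges_py; infer_instance

-- ===== CLAIM (what is proved, stated in full; the proofs are below) =====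
def Claim_equal_check_shared_edges_py : Prop := ∀ (partitions : List (List String)), Dom_check_shared_edges_py partitions → Spec_check_shared_edges_py partitions (check_shared_edges_py partitions)

-- ===== LEMMAS AND PROOFS =====

-- 'if k not in d: d[k] = w' (A's ensure-key statement; = dict.setdefault)
def pvEns {κ ν : Type} [BEq κ] (d : PySem.Dict κ ν) (k : κ) (w : ν) : PySem.Dict κ ν :=
  if d.contains k then d else d.insert k w

-- A's per-event update of one dict (ensure both keys, then modify both), as used for
-- shared_edges (f = append) and neighbours (f = Set.add)
def pvStepA {κ ν : Type} [BEq κ] (d : PySem.Dict κ ν) (i j : κ) (w : ν) (f g : ν → ν) : PySem.Dict κ ν :=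
  ((pvEns (pvEns d i w) j w).modify i w f).modify j w g

lemma pv_setdefault_eq_ens {κ ν : Type} [BEq κ] (d : PySem.Dict κ ν) (k : κ) (w : ν) :
    d.setdefault k w = pvEns d k w := by
  unfold pvEns
  by_cases h : d.contains k = true
  · rw [if_pos h, PySem.Dict.setdefault_of_contains d w h]
  · have hb : d.contains k = false := Bool.not_eq_true _ ▸ Bool.of_not_eq_true h
    rw [if_neg h, PySem.Dict.setdefault_of_not_contains d w hb]

lemma pv_contains_ens_self {κ ν : Type} [BEq κ] [LawfulBEq κ] (d : PySem.Dict κ ν) (k : κ) (w : ν) :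
    (pvEns d k w).contains k = true := by
  unfold pvEns
  by_cases h : d.contains k = true
  · rw [if_pos h]; exact h
  · rw [if_neg h]; exact PySem.Dict.contains_insert_self d k w

lemma pv_ens_modify {κ ν : Type} [BEq κ] [LawfulBEq κ] (d : PySem.Dict κ ν) (k : κ) (w : ν) (f : ν → ν) :
    (pvEns d k w).modify k w f = d.modify k w f := by
  unfold pvEns
  by_cases h : d.contains k = true
  · rw [if_pos h]
  · have hb : d.contains k = false := Bool.not_eq_true _ ▸ Bool.of_not_eq_true h
    rw [if_neg h]
    show (d.insert k w).insert k (f ((d.insert k w).getD k w)) = d.insert k (f (d.getD k w))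
    rw [PySem.Dict.getD_insert_self, PySem.Dict.insert_insert_self,
        PySem.Dict.getD_of_not_contains d w hb]

-- inserting a FRESH key k and overwriting a PRESENT key k' commute (items and all)
lemma pv_insert_insert_swap {κ ν : Type} [BEq κ] [LawfulBEq κ] (d : PySem.Dict κ ν) (k k' : κ)
    (w x : ν) (hk : d.contains k = false) (hk' : d.contains k' = true) (hne : k' ≠ k) :
    (d.insert k w).insert k' x = (d.insert k' x).insert k w := by
  have hbe' : (k == k') = false := by simp [Ne.symm hne]
  have h1 : (d.insert k w).contains k' = true := by
    rw [PySem.Dict.contains_insert]; simp [hk']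
  have h2' : (d.insert k' x).contains k = false := by
    rw [PySem.Dict.contains_insert, hbe', hk]; rfl
  apply PySem.Dict.ext
  rw [PySem.Dict.items_insert_of_contains _ x h1,
      PySem.Dict.items_insert_of_not_contains d w hk,
      PySem.Dict.items_insert_of_not_contains _ w h2',
      PySem.Dict.items_insert_of_contains d x hk',
      List.map_append]
  simp [hbe']

-- overwriting two distinct PRESENT keys commutes
lemma pv_insert_insert_comm_present {κ ν : Type} [BEq κ] [LawfulBEq κ] (d : PySem.Dict κ ν)
    (k k' : κ) (x x' : ν) (hk : d.contains k = true) (hk' : d.contains k' = true) (hne : k ≠ k') :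
    (d.insert k x).insert k' x' = (d.insert k' x').insert k x := by
  have h1 : (d.insert k x).contains k' = true := by
    rw [PySem.Dict.contains_insert]; simp [hk']
  have h2 : (d.insert k' x').contains k = true := by
    rw [PySem.Dict.contains_insert]; simp [hk]
  apply PySem.Dict.ext
  rw [PySem.Dict.items_insert_of_contains _ x' h1,
      PySem.Dict.items_insert_of_contains d x hk,
      PySem.Dict.items_insert_of_contains _ x h2,
      PySem.Dict.items_insert_of_contains d x' hk',
      List.map_map, List.map_map]
  apply List.map_congr_left
  intro p _
  simp only [Function.comp]
  by_cases hpk : (p.1 == k) = true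
  · have : (p.1 == k') = false := by
      rw [eq_of_beq hpk]; simp [hne]
    simp [hpk, this, show (k == k') = false by simp [hne]]
  · by_cases hpk' : (p.1 == k') = true
    · simp [hpk, hpk', show (k' == k) = false by simp [Ne.symm hne]]
    · simp [hpk, hpk']

-- ensuring a key k commutes past modifying a PRESENT other key k'
lemma pv_ens_modify_comm {κ ν : Type} [BEq κ] [LawfulBEq κ] (d : PySem.Dict κ ν) (k k' : κ)
    (w v0 : ν) (f : ν → ν) (hk' : d.contains k' = true) (hne : k' ≠ k) :
    (pvEns d k w).modify k' v0 f = pvEns (d.modify k' v0 f) k w := by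
  have hbe' : (k == k') = false := by simp [Ne.symm hne]
  unfold pvEns
  by_cases h : d.contains k = true
  · have h3 : (d.modify k' v0 f).contains k = true := by
      rw [PySem.Dict.contains_modify]; simp [h]
    rw [if_pos h, if_pos h3]
  · have hb : d.contains k = false := Bool.not_eq_true _ ▸ Bool.of_not_eq_true h
    have h2 : ¬ ((d.modify k' v0 f).contains k = true) := by
      rw [PySem.Dict.contains_modify, hbe', hb]; simp
    rw [if_neg h, if_neg h2]
    show (d.insert k w).insert k' (f ((d.insert k w).getD k' v0))
        = (d.insert k' (f (d.getD k' v0))).insert k w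
    rw [PySem.Dict.getD_insert_of_ne d w v0 hne]
    exact pv_insert_insert_swap d k k' w (f (d.getD k' v0)) hb hk' hne

-- A's ensure-ensure-modify-modify per-event update collapses to modify-modify (i ≠ j)
lemma pv_stepA_eq {κ ν : Type} [BEq κ] [LawfulBEq κ] (d : PySem.Dict κ ν) (i j : κ)
    (w : ν) (f g : ν → ν) (hne : i ≠ j) :
    pvStepA d i j w f g = (d.modify i w f).modify j w g := by
  unfold pvStepA
  rw [pv_ens_modify_comm (pvEns d i w) j i w w f (pv_contains_ens_self d i w) hne,
      pv_ens_modify d i w f, pv_ens_modify (d.modify i w f) j w g]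

-- two successive modifies of the same key compose
lemma pv_modify_modify_self {κ ν : Type} [BEq κ] [LawfulBEq κ] (d : PySem.Dict κ ν) (k : κ)
    (w : ν) (f f' : ν → ν) :
    (d.modify k w f).modify k w f' = d.modify k w (fun v => f' (f v)) := by
  show (d.modify k w f).insert k (f' ((d.modify k w f).getD k w)) = d.insert k (f' (f (d.getD k w)))
  rw [PySem.Dict.getD_modify_self]
  show ((d.insert k (f (d.getD k w))).insert k (f' (f (d.getD k w)))) = _
  rw [PySem.Dict.insert_insert_self]

-- modifying a PRESENT key i commutes past modifying any other key j
lemma pv_modify_comm {κ ν : Type} [BEq κ] [LawfulBEq κ] (d : PySem.Dict κ ν) (i j : κ)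
    (w w' : ν) (f g : ν → ν) (hi : d.contains i = true) (hne : j ≠ i) :
    (d.modify i w f).modify j w' g = (d.modify j w' g).modify i w f := by
  show (d.modify i w f).insert j (g ((d.modify i w f).getD j w'))
      = (d.modify j w' g).insert i (f ((d.modify j w' g).getD i w))
  have hgj : (d.modify i w f).getD j w' = d.getD j w' :=
    PySem.Dict.getD_insert_of_ne d (f (d.getD i w)) w' hne
  have hgi : (d.modify j w' g).getD i w = d.getD i w :=
    PySem.Dict.getD_insert_of_ne d (g (d.getD j w')) w (Ne.symm hne)
  rw [hgj, hgi]
  show (d.insert i (f (d.getD i w))).insert j (g (d.getD j w'))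
      = (d.insert j (g (d.getD j w'))).insert i (f (d.getD i w))
  by_cases hj : d.contains j = true
  · exact pv_insert_insert_comm_present d i j _ _ hi hj (Ne.symm hne)
  · have hb : d.contains j = false := Bool.not_eq_true _ ▸ Bool.of_not_eq_true hj
    exact (pv_insert_insert_swap d j i (g (d.getD j w')) (f (d.getD i w)) hb hi (Ne.symm hne)).symm

-- core block identity: a loop of (modify i; modify j) with i already pending collapses to
-- the j-loop followed by one composed modify of i
lemma pv_blockQ {κ ν : Type} [BEq κ] [LawfulBEq κ] (i : κ) (w : ν) (h g : κ → ν → ν) :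
    ∀ (t : List κ) (D : PySem.Dict κ ν) (f : ν → ν),
      D.contains i = true → (∀ j ∈ t, j ≠ i) →
      t.foldl (fun d j => (d.modify i w (h j)).modify j w (g j)) (D.modify i w f)
        = (t.foldl (fun d j => d.modify j w (g j)) D).modify i w
            (fun v => t.foldl (fun v j => h j v) (f v)) := by
  intro t
  induction t with
  | nil => intro D f _ _; rfl
  | cons j t ih =>
    intro D f hD hne
    have hji : j ≠ i := hne j (List.mem_cons_self)
    simp only [List.foldl_cons]
    rw [pv_modify_modify_self D i w f (h j),
        pv_modify_comm D i j w w (fun v => h j (f v)) (g j) hD hji,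
        ih (D.modify j w (g j)) (fun v => h j (f v))
          (by rw [PySem.Dict.contains_modify]; simp [hD])
          (fun j' hj' => hne j' (List.mem_cons_of_mem j hj'))]

-- the block form: ensure i, run the j-loop, then one composed modify of i
lemma pv_block {κ ν : Type} [BEq κ] [LawfulBEq κ] (i : κ) (w : ν) (h g : κ → ν → ν)
    (j0 : κ) (t : List κ) (d : PySem.Dict κ ν) (hne : ∀ j ∈ j0 :: t, j ≠ i) :
    (j0 :: t).foldl (fun d j => (d.modify i w (h j)).modify j w (g j)) d
      = ((j0 :: t).foldl (fun d j => d.modify j w (g j)) (d.setdefault i w)).modify i w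
          (fun v => (j0 :: t).foldl (fun v j => h j v) v) := by
  have hj0 : j0 ≠ i := hne j0 (List.mem_cons_self)
  simp only [List.foldl_cons]
  rw [show d.modify i w (h j0) = (d.setdefault i w).modify i w (h j0) by
        rw [pv_setdefault_eq_ens, pv_ens_modify],
      pv_modify_comm (d.setdefault i w) i j0 w w (h j0) (g j0)
        (by rw [pv_setdefault_eq_ens]; exact pv_contains_ens_self d i w) hj0,
      pv_blockQ i w h g t ((d.setdefault i w).modify j0 w (g j0)) (h j0)
        (by rw [PySem.Dict.contains_modify, pv_setdefault_eq_ens]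
            simp [pv_contains_ens_self d i w])
        (fun j' hj' => hne j' (List.mem_cons_of_mem j0 hj'))]

-- a guarded accumulate-loop is the fold over the filterMap of its guard
lemma pv_foldl_guard {α β σ : Type} (l : List α) (p : α → Prop) [DecidablePred p]
    (h : α → β) (u : σ → β → σ) (st : σ) :
    l.foldl (fun st x => if p x then u st (h x) else st) st
      = (l.filterMap (fun x => if p x then some (h x) else none)).foldl u st := by
  induction l generalizing st with
  | nil => simp
  | cons x t ih =>
    by_cases hx : p x
    · simp only [List.foldl_cons, List.filterMap_cons, hx, if_true]
      exact ih _
    · simp only [List.foldl_cons, List.filterMap_cons, hx, if_false]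
      exact ih _

-- folding the per-edge appends of one partition over a Nodup key list
lemma pv_modify_fold_getD (l : List String) (hnd : l.Nodup) (d : PySem.Dict String (List Int))
    (idx : Int) (c : String) :
    (l.foldl (fun d e => d.modify e [] (fun v => v ++ [idx])) d).getD c []
      = d.getD c [] ++ (if l.contains c then [idx] else []) := by
  induction l generalizing d with
  | nil => simp
  | cons e t ih =>
    rcases List.nodup_cons.mp hnd with ⟨he, ht⟩
    simp only [List.foldl_cons, ih ht]
    by_cases hc : c = e
    · subst hc
      simp [PySem.Dict.getD_modify_self, he]
    · simp [PySem.Dict.getD_modify, hc]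

-- the inverted index lists exactly the partitions containing an edge, in ascending index order
lemma pv_occ_aux (l : List (Int × List String)) (d : PySem.Dict String (List Int)) (c : String) :
    (l.foldl (fun d ip =>
        (PySem.List.dedup ip.2).foldl (fun d e => d.modify e [] (fun v => v ++ [ip.1])) d) d).getD c []
      = d.getD c [] ++ l.filterMap (fun ip => if ip.2.contains c then some ip.1 else none) := by
  induction l generalizing d with
  | nil => simp
  | cons ip t ih =>
    simp only [List.foldl_cons, ih, List.filterMap_cons]
    rw [pv_modify_fold_getD _ (PySem.List.nodup_dedup ip.2)]
    by_cases hc : ip.2.contains c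
    · simp only [hc, if_true]
      simp at hc
      simp [hc]
    · rw [if_neg hc]
      simp at hc
      simp [hc]

lemma pv_occ_getD (partitions : List (List String)) (c : String) :
    (pvOccurrences partitions).getD c []
      = (PySem.List.enumerate partitions 0).filterMap
          (fun ip => if ip.2.contains c then some ip.1 else none) := by
  unfold pvOccurrences
  rw [pv_occ_aux]
  simp

-- B's partner list js for a fixed (i, element) is A's guarded scan of all partitions
lemma pv_js_eq (partitions : List (List String)) (i : Int) (e : String) :
    (PySem.List.enumerate partitions 0).filterMap
        (fun jp => if jp.1 > i ∧ jp.2.contains e then some jp.1 else none)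
      = ((pvOccurrences partitions).getD e []).filter (fun j => j > i) := by
  rw [pv_occ_getD, List.filter_filterMap]
  congr 1
  funext jp
  by_cases hm : e ∈ jp.2
  · by_cases hj : i < jp.1
    · simp [hm, hj, Option.filter]
    · simp [hm, hj, Option.filter]
  · simp [hm, Option.filter]

-- a fold whose step acts componentwise splits into independent folds
lemma pv_foldl_prod4 {α σ1 σ2 σ3 σ4 : Type} (l : List α)
    (f1 : σ1 → α → σ1) (f2 : σ2 → α → σ2) (f3 : σ3 → α → σ3) (f4 : σ4 → α → σ4)
    (a : σ1) (b : σ2) (c : σ3) (d : σ4) :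
    l.foldl (fun st x => (f1 st.1 x, f2 st.2.1 x, f3 st.2.2.1 x, f4 st.2.2.2 x)) (a, b, c, d)
      = (l.foldl f1 a, l.foldl f2 b, l.foldl f3 c, l.foldl f4 d) := by
  induction l generalizing a b c d with
  | nil => rfl
  | cons x t ih => exact ih _ _ _ _

lemma pv_foldl_prod2 {α σ1 σ2 : Type} (l : List α)
    (f1 : σ1 → α → σ1) (f2 : σ2 → α → σ2) (a : σ1) (b : σ2) :
    l.foldl (fun st x => (f1 st.1 x, f2 st.2 x)) (a, b) = (l.foldl f1 a, l.foldl f2 b) := by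
  induction l generalizing a b with
  | nil => rfl
  | cons x t ih => exact ih _ _

-- adding the same element repeatedly is one add
lemma pv_fold_add_const (e : String) (t : List Int) (s : PySem.Set String) (hm : e ∈ s) :
    t.foldl (fun s (_ : Int) => PySem.Set.add s e) s = s := by
  induction t with
  | nil => rfl
  | cons j t ih => rw [List.foldl_cons, PySem.Set.add_of_mem hm]; exact ih

-- repeated overwrites of one key keep only the last value
lemma pv_fold_insert_last (i : Int) (e : String) (d : PySem.Dict String (List Int)) :
    ∀ (t : List Int) (j0 : Int),
      (j0 :: t).foldl (fun d j => d.insert e [i, j]) d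
        = d.insert e [i, PySem.List.pyGetD (j0 :: t) (-1) 0] := by
  intro t
  induction t generalizing d with
  | nil =>
    intro j0
    simp [PySem.List.pyGetD, PySem.List.pyGet?, PySem.List.pyIdx?]
  | cons j1 t ih =>
    intro j0
    have hlast : PySem.List.pyGetD (j0 :: j1 :: t) (-1) 0 = PySem.List.pyGetD (j1 :: t) (-1) 0 := by
      simp [PySem.List.pyGetD, PySem.List.pyGet?, PySem.List.pyIdx?]
      rfl
    rw [List.foldl_cons, ih (d.insert e [i, j0]) j1, PySem.Dict.insert_insert_self, hlast]

-- appending a constant element once per list entry is one replicate-append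
lemma pv_fold_append_const (e : String) (t : List Int) (v : List String) :
    t.foldl (fun (v : List String) (_ : Int) => v ++ [e]) v = v ++ List.replicate t.length e := by
  induction t generalizing v with
  | nil => simp
  | cons j t ih =>
    rw [List.foldl_cons, ih, List.length_cons, List.replicate_succ, List.append_assoc]
    simp

-- a per-partition cache whose entries always equal their canonical value can be dropped
lemma pv_cache_fold (i : Int) (occd : PySem.Dict String (List Int)) :
    ∀ (part : List String)
      (st : (PySem.Dict Int (List String)) × (PySem.Set String) × (PySem.Dict String (List Int)) × (PySem.Dict Int (PySem.Set Int)))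
      (cache : PySem.Dict String (List Int)),
      (∀ e js, cache.get? e = some js → js = (occd.getD e []).filter (fun j => j > i)) →
      (part.foldl (fun (stc : ((PySem.Dict Int (List String)) × (PySem.Set String) × (PySem.Dict String (List Int)) × (PySem.Dict Int (PySem.Set Int))) × PySem.Dict String (List Int)) e =>
        let jsOpt := stc.2.get? e
        let js := match jsOpt with
          | some js => js
          | none => (occd.getD e []).filter (fun j => j > i)
        let partners := match jsOpt with
          | some _ => stc.2
          | none => stc.2.insert e js
        ((if js ≠ [] then
            let st := stc.1
            let raw := PySem.Set.add st.2.1 e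
            let ebs := st.2.2.1.insert e [i, PySem.List.pyGetD js (-1) 0]
            let se := st.1.setdefault i []
            let nb := st.2.2.2.setdefault i []
            let senb := js.foldl (fun (senb : PySem.Dict Int (List String) × PySem.Dict Int (PySem.Set Int)) j =>
                ((if senb.1.contains j then senb.1 else senb.1.insert j []).modify j [] (fun l => l ++ [e]),
                 (if senb.2.contains j then senb.2 else senb.2.insert j []).modify j [] (fun s => PySem.Set.add s i))) (se, nb)
            let se := senb.1.modify i [] (fun l => l ++ List.replicate js.length e)
            let nb := senb.2.modify i [] (fun s => PySem.Set.update s js)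
            (se, raw, ebs, nb)
          else stc.1), partners)) (st, cache)).1
      = part.foldl (fun st e =>
          let js := (occd.getD e []).filter (fun j => j > i)
          if js ≠ [] then
            let raw := PySem.Set.add st.2.1 e
            let ebs := st.2.2.1.insert e [i, PySem.List.pyGetD js (-1) 0]
            let se := st.1.setdefault i []
            let nb := st.2.2.2.setdefault i []
            let senb := js.foldl (fun (senb : PySem.Dict Int (List String) × PySem.Dict Int (PySem.Set Int)) j =>
                ((if senb.1.contains j then senb.1 else senb.1.insert j []).modify j [] (fun l => l ++ [e]),
                 (if senb.2.contains j then senb.2 else senb.2.insert j []).modify j [] (fun s => PySem.Set.add s i))) (se, nb)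
            let se := senb.1.modify i [] (fun l => l ++ List.replicate js.length e)
            let nb := senb.2.modify i [] (fun s => PySem.Set.update s js)
            (se, raw, ebs, nb)
          else st) st := by
  intro part
  induction part with
  | nil => intro st cache _; rfl
  | cons e t ih =>
    intro st cache hinv
    simp only [List.foldl_cons]
    cases h : cache.get? e with
    | some js =>
      rw [hinv e js h]
      exact ih _ cache hinv
    | none =>
      refine ih _ (cache.insert e ((occd.getD e []).filter (fun j => j > i))) ?_
      intro e' js' h'
      rw [PySem.Dict.get?_insert] at h'
      by_cases he : e' = e
      · rw [if_pos he] at h'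
        cases h'
        rw [he]
      · rw [if_neg he] at h'
        exact hinv e' js' h'

-- the per-(i, element) step: A's guarded scan over all partitions equals B's block over js
lemma pv_point (partitions : List (List String)) (i : Int) (e : String)
    (se0 : PySem.Dict Int (List String)) (raw0 : PySem.Set String)
    (ebs0 : PySem.Dict String (List Int)) (nb0 : PySem.Dict Int (PySem.Set Int)) :
    (PySem.List.enumerate partitions 0).foldl (fun st jp =>
        if jp.1 > i ∧ jp.2.contains e then
          (pvStepA st.1 i jp.1 [] (fun l => l ++ [e]) (fun l => l ++ [e]),
           PySem.Set.add st.2.1 e,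
           st.2.2.1.insert e [i, jp.1],
           pvStepA st.2.2.2 i jp.1 [] (fun s => PySem.Set.add s jp.1) (fun s => PySem.Set.add s i))
        else st) (se0, raw0, ebs0, nb0)
      = (let js := ((pvOccurrences partitions).getD e []).filter (fun j => j > i)
         if js ≠ [] then
           (let raw := PySem.Set.add raw0 e
            let ebs := ebs0.insert e [i, PySem.List.pyGetD js (-1) 0]
            let se := se0.setdefault i []
            let nb := nb0.setdefault i []
            let senb := js.foldl (fun (senb : PySem.Dict Int (List String) × PySem.Dict Int (PySem.Set Int)) j =>
                ((if senb.1.contains j then senb.1 else senb.1.insert j []).modify j [] (fun l => l ++ [e]),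
                 (if senb.2.contains j then senb.2 else senb.2.insert j []).modify j [] (fun s => PySem.Set.add s i))) (se, nb)
            let se := senb.1.modify i [] (fun l => l ++ List.replicate js.length e)
            let nb := senb.2.modify i [] (fun s => PySem.Set.update s js)
            (se, raw, ebs, nb))
         else (se0, raw0, ebs0, nb0)) := by
  rw [pv_foldl_guard (PySem.List.enumerate partitions 0)
        (fun jp => jp.1 > i ∧ jp.2.contains e) (fun jp => jp.1)
        (fun st j =>
          (pvStepA st.1 i j [] (fun l => l ++ [e]) (fun l => l ++ [e]),
           PySem.Set.add st.2.1 e,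
           st.2.2.1.insert e [i, j],
           pvStepA st.2.2.2 i j [] (fun s => PySem.Set.add s j) (fun s => PySem.Set.add s i)))
        (se0, raw0, ebs0, nb0),
      pv_js_eq partitions i e]
  cases hjs : ((pvOccurrences partitions).getD e []).filter (fun j => j > i) with
  | nil => simp
  | cons j0 t =>
    have hgt : ∀ j ∈ j0 :: t, i < j := by
      intro j hj
      rw [← hjs] at hj
      have := (List.mem_filter.mp hj).2
      simpa using this
    have hne : ∀ j ∈ j0 :: t, j ≠ i := fun j hj => (Int.ne_of_lt (hgt j hj)).symm
    simp only [ne_eq, reduceCtorEq, not_false_eq_true, if_true]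
    rw [pv_foldl_prod4 (j0 :: t)
        (fun d j => pvStepA d i j [] (fun l => l ++ [e]) (fun l => l ++ [e]))
        (fun s _ => PySem.Set.add s e)
        (fun d j => d.insert e [i, j])
        (fun d j => pvStepA d i j [] (fun s => PySem.Set.add s j) (fun s => PySem.Set.add s i))
        se0 raw0 ebs0 nb0,
      pv_foldl_prod2 (j0 :: t)
        (fun d j => (if d.contains j then d else d.insert j []).modify j [] (fun l => l ++ [e]))
        (fun d j => (if d.contains j then d else d.insert j []).modify j [] (fun s => PySem.Set.add s i))
        (se0.setdefault i []) (nb0.setdefault i []),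
      PySem.List.foldl_congr_mem' (j0 :: t)
        (fun d j => (if d.contains j then d else d.insert j []).modify j [] (fun l => l ++ [e]))
        (fun d j => d.modify j [] (fun l => l ++ [e]))
        (se0.setdefault i [])
        (fun j _ d => pv_ens_modify d j [] (fun l => l ++ [e])),
      PySem.List.foldl_congr_mem' (j0 :: t)
        (fun d j => (if d.contains j then d else d.insert j []).modify j [] (fun s => PySem.Set.add s i))
        (fun d j => d.modify j [] (fun s => PySem.Set.add s i))
        (nb0.setdefault i [])
        (fun j _ d => pv_ens_modify d j [] (fun s => PySem.Set.add s i))]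
    simp only [Prod.mk.injEq]
    refine ⟨?_, ?_, ?_, ?_⟩
    · -- shared_edges
      rw [PySem.List.foldl_congr_mem' (j0 :: t) _
            (fun d j => (d.modify i [] (fun l => l ++ [e])).modify j [] (fun l => l ++ [e])) se0
            (fun j hj d => pv_stepA_eq d i j [] _ _ (Int.ne_of_lt (hgt j hj))),
          pv_block i [] (fun _ l => l ++ [e]) (fun _ l => l ++ [e]) j0 t se0 hne]
      congr 1
      funext v
      exact pv_fold_append_const e (j0 :: t) v
    · -- raw_shared_edges
      rw [List.foldl_cons]
      exact pv_fold_add_const e t (PySem.Set.add raw0 e) (by simp [PySem.Set.mem_add])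
    · -- edge_based_sharing
      exact pv_fold_insert_last i e ebs0 t j0
    · -- neighbours
      rw [PySem.List.foldl_congr_mem' (j0 :: t) _
            (fun d j => (d.modify i [] (fun s => PySem.Set.add s j)).modify j [] (fun s => PySem.Set.add s i)) nb0
            (fun j hj d => pv_stepA_eq d i j [] _ _ (Int.ne_of_lt (hgt j hj))),
          pv_block i [] (fun j s => PySem.Set.add s j) (fun _ s => PySem.Set.add s i) j0 t nb0 hne]
      rfl

-- ===== VERDICT (by name: the statement is the Claim_ definition above) =====
theorem check_shared_edges_py_spec : Claim_equal_check_shared_edges_py := by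
  intro partitions _
  unfold Spec_check_shared_edges_py check_shared_edges_py check_shared_edges_py_alt
  have hmain :
      (PySem.List.enumerate partitions 0).foldl (fun st ip =>
        ip.2.foldl (fun st e =>
          (PySem.List.enumerate partitions 0).foldl (fun
              (st : (PySem.Dict Int (List String)) × (PySem.Set String) × (PySem.Dict String (List Int)) × (PySem.Dict Int (PySem.Set Int))) jp =>
            if jp.1 > ip.1 ∧ jp.2.contains e then
              (pvStepA st.1 ip.1 jp.1 [] (fun l => l ++ [e]) (fun l => l ++ [e]),
               PySem.Set.add st.2.1 e,
               st.2.2.1.insert e [ip.1, jp.1],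
               pvStepA st.2.2.2 ip.1 jp.1 [] (fun s => PySem.Set.add s jp.1) (fun s => PySem.Set.add s ip.1))
            else st) st) st)
        (PySem.Dict.empty, PySem.Set.empty, PySem.Dict.empty, PySem.Dict.empty)
      = (PySem.List.enumerate partitions 0).foldl (fun st ip =>
          (ip.2.foldl (fun (stc : ((PySem.Dict Int (List String)) × (PySem.Set String) × (PySem.Dict String (List Int)) × (PySem.Dict Int (PySem.Set Int))) × PySem.Dict String (List Int)) element =>
            let jsOpt := stc.2.get? element
            let js := match jsOpt with
              | some js => js
              | none => ((pvOccurrences partitions).getD element []).filter (fun j => j > ip.1)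
            let partners := match jsOpt with
              | some _ => stc.2
              | none => stc.2.insert element js
            ((if js ≠ [] then
                let st := stc.1
                let raw := PySem.Set.add st.2.1 element
                let ebs := st.2.2.1.insert element [ip.1, PySem.List.pyGetD js (-1) 0]
                let se := st.1.setdefault ip.1 []
                let nb := st.2.2.2.setdefault ip.1 []
                let senb := js.foldl (fun (senb : PySem.Dict Int (List String) × PySem.Dict Int (PySem.Set Int)) j =>
                    ((if senb.1.contains j then senb.1 else senb.1.insert j []).modify j [] (fun l => l ++ [element]),
                     (if senb.2.contains j then senb.2 else senb.2.insert j []).modify j [] (fun s => PySem.Set.add s ip.1))) (se, nb)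
                let se := senb.1.modify ip.1 [] (fun l => l ++ List.replicate js.length element)
                let nb := senb.2.modify ip.1 [] (fun s => PySem.Set.update s js)
                (se, raw, ebs, nb)
              else stc.1), partners)) (st, PySem.Dict.empty)).1)
        (PySem.Dict.empty, PySem.Set.empty, PySem.Dict.empty, PySem.Dict.empty) := by
    apply PySem.List.foldl_congr_mem'
    intro ip _ st
    refine Eq.trans ?_ (pv_cache_fold ip.1 (pvOccurrences partitions) ip.2 st PySem.Dict.empty
      (by intro e js h; rw [PySem.Dict.get?_empty] at h; cases h)).symm
    apply PySem.List.foldl_congr_mem'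
    intro e _ st
    obtain ⟨se0, raw0, ebs0, nb0⟩ := st
    exact pv_point partitions ip.1 e se0 raw0 ebs0 nb0
  exact congrArg (fun st => (st.1.items, st.2.1, st.2.2.1.items, st.2.2.2.items)) hmain
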